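-- pv_equiv track=rewrite | github.com/stance-detection/Automatic-Stance-Detection | baseline/feature_engineering.py | append_ngrams
-- ===== SOURCE A (Python) =====
-- def ngrams(input, n):
--     input = input.split(' ')
--     output = []
--     for i in range(len(input) - n + 1):
--         output.append(input[i:i + n])
--     return output
--
-- def append_ngrams(features, text_headline, text_body, size):
--     grams = [' '.join(x) for x in ngrams(text_headline, size)]
--     grams_hits = 0
--     grams_early_hits = 0
--     for gram in grams:
--         if gram in text_body:
--             grams_hits += 1
--         if gram in text_body[:255]:
--             grams_early_hits += 1
--     features.append(grams_hits)
--     features.append(grams_early_hits)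
--     return features
-- ===== SOURCE B (Python) =====
-- def append_ngrams(features, text_headline, text_body, size):
--     words = text_headline.split(' ')
--     early = text_body[:255]
--     counts = {}
--     for i in range(len(words) - size + 1):
--         gram = ' '.join(words[i:i + size])
--         counts[gram] = counts.get(gram, 0) + 1
--     hits = 0
--     early_hits = 0
--     for gram, c in counts.items():
--         if gram in early:
--             hits += c
--             early_hits += c
--         elif gram in text_body:
--             hits += c
--     features.append(hits)
--     features.append(early_hits)
--     return features
-- ===== Notes on version B (the rewrite author's own statement) =====
-- stated objective: alternative
-- what changed: B counts each n-gram's multiplicity in a dict built in one pass and then searches the body once per DISTINCT n-gram, checking the 255-char prefix first so a prefix hit skips the full-body scan; A searches the body twice for every n-gram occurrence.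
import Mathlib
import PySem

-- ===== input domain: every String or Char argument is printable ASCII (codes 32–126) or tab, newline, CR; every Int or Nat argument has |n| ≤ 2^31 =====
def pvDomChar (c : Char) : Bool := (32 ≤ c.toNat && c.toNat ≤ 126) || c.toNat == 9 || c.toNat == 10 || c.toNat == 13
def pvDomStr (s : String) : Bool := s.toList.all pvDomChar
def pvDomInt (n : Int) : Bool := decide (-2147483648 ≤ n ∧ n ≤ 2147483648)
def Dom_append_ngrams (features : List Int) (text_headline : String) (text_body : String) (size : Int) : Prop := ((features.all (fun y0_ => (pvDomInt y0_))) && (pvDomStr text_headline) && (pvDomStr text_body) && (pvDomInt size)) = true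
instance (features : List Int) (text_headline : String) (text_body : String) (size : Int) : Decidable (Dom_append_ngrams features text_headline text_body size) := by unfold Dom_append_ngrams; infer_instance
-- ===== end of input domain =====

-- B replaces A's two substring scans per n-gram by a hash count of the n-grams (each DISTINCT
-- n-gram is searched once, with multiplicity added) and checks the 255-char prefix first (a
-- prefix hit is a body hit, so the second scan is skipped); same return value everywhere.
-- Both A and B append to `features` in place in Python; the equivalence is about the return value.

-- ===== PORT A =====
-- `input.split(' ')`: PySem.Str.split? is `some` for the non-empty separator " ", so `.getD []`
-- never takes its default; the Option is only unwrapped.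
def pv_ngrams (input : String) (n : Int) : List (List String) :=
  let inp := (PySem.Str.split? input " ").getD []
  (PySem.List.pyRange 0 ((inp.length : Int) - n + 1) 1).foldl
    (fun output i => output ++ [PySem.List.slice inp (some i) (some (i + n))]) []

def append_ngrams (features : List Int) (text_headline : String) (text_body : String) (size : Int) : List Int :=
  let grams := (pv_ngrams text_headline size).map (fun x => PySem.Str.join " " x)
  let p := grams.foldl
    (fun (p : Int × Int) gram =>
      let p := if PySem.Str.isIn gram text_body then (p.1 + 1, p.2) else p
      if PySem.Str.isIn gram (PySem.Str.slice text_body none (some 255)) then (p.1, p.2 + 1) else p)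
    (0, 0)
  features ++ [p.1] ++ [p.2]

-- ===== PORT B =====
def append_ngrams_alt (features : List Int) (text_headline : String) (text_body : String) (size : Int) : List Int :=
  let words := (PySem.Str.split? text_headline " ").getD []
  let early := PySem.Str.slice text_body none (some 255)
  let counts := (PySem.List.pyRange 0 ((words.length : Int) - size + 1) 1).foldl
    (fun (d : PySem.Dict String Int) i =>
      let gram := PySem.Str.join " " (PySem.List.slice words (some i) (some (i + size)))
      d.insert gram (d.getD gram 0 + 1))
    PySem.Dict.empty
  let p := counts.items.foldl
    (fun (p : Int × Int) gc =>
      if PySem.Str.isIn gc.1 early then (p.1 + gc.2, p.2 + gc.2)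
      else if PySem.Str.isIn gc.1 text_body then (p.1 + gc.2, p.2) else p)
    (0, 0)
  features ++ [p.1] ++ [p.2]

-- ===== PRECONDITION & SPEC =====
def Spec_append_ngrams (features : List Int) (text_headline : String) (text_body : String) (size : Int) (out : List Int) : Prop := out = append_ngrams_alt features text_headline text_body size
instance (features : List Int) (text_headline : String) (text_body : String) (size : Int) (out : List Int) : Decidable (Spec_append_ngrams features text_headline text_body size out) := by unfold Spec_append_ngrams; infer_instance

-- ===== CLAIM (what is proved, stated in full; the proofs are below) =====
def Claim_equal_append_ngrams : Prop := ∀ (features : List Int) (text_headline : String) (text_body : String) (size : Int), Dom_append_ngrams features text_headline text_body size → Spec_append_ngrams features text_headline text_body size (append_ngrams features text_headline text_body size)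

-- ===== LEMMAS AND PROOFS =====

-- A's loop: two running integer counters over the gram list are the two countP's.
theorem pv_loopA (pb pe : String → Bool) (gs : List String) (h e : Int) :
    gs.foldl
      (fun (p : Int × Int) gram =>
        let p := if pb gram then (p.1 + 1, p.2) else p
        if pe gram then (p.1, p.2 + 1) else p)
      (h, e)
    = (h + (gs.countP pb : Int), e + (gs.countP pe : Int)) := by
  induction gs generalizing h e with
  | nil => simp
  | cons g t ih =>
    simp only [List.foldl_cons, List.countP_cons]
    cases hb : pb g <;> cases he : pe g <;>
      simp [ih, Prod.ext_iff] <;> omega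

-- B's loop over (key, multiplicity) pairs, given that a prefix hit implies a body hit.
theorem pv_loopB (pb pe : String → Bool) (hImp : ∀ g, pe g = true → pb g = true)
    (ks : List String) (c : String → Int) (h e : Int) :
    (ks.map (fun k => (k, c k))).foldl
      (fun (p : Int × Int) gc =>
        if pe gc.1 then (p.1 + gc.2, p.2 + gc.2)
        else if pb gc.1 then (p.1 + gc.2, p.2) else p)
      (h, e)
    = (h + (ks.map (fun k => if pb k then c k else 0)).sum,
       e + (ks.map (fun k => if pe k then c k else 0)).sum) := by
  induction ks generalizing h e with
  | nil => simp
  | cons k t ih =>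
    simp only [List.map_cons, List.foldl_cons, List.sum_cons]
    cases he : pe k
    · cases hb : pb k <;> simp only [he, hb, ih, Prod.ext_iff, if_false, if_true, Bool.false_eq_true] <;> omega
    · have hb := hImp k he
      simp only [he, hb, ih, Prod.ext_iff, if_true] <;> omega

-- a 0/e-sum over a Nodup list containing x picks out e once
theorem pv_sum_ite_notmem (x : String) (e : Int) (ks : List String) (hx : x ∉ ks) :
    (ks.map (fun k => if x = k then e else 0)).sum = 0 := by
  induction ks with
  | nil => simp
  | cons k t ih =>
    simp only [List.mem_cons, not_or] at hx
    simp only [List.map_cons, List.sum_cons, if_neg hx.1, ih hx.2, zero_add]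

theorem pv_sum_ite_mem (x : String) (e : Int) (ks : List String) (hnd : ks.Nodup) (hx : x ∈ ks) :
    (ks.map (fun k => if x = k then e else 0)).sum = e := by
  induction ks with
  | nil => simp at hx
  | cons k t ih =>
    rcases List.nodup_cons.mp hnd with ⟨hk, hnd'⟩
    rcases List.mem_cons.mp hx with rfl | hx'
    · simp only [List.map_cons, List.sum_cons, if_true, pv_sum_ite_notmem x e t hk, add_zero]
    · have hne : x ≠ k := fun h => hk (h ▸ hx')
      simp only [List.map_cons, List.sum_cons, if_neg hne, ih hnd' hx', zero_add]

-- multiplicity-weighted 0/1 sum over a covering Nodup key list is countP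
theorem pv_sum_count (p : String → Bool) (gs ks : List String)
    (hnd : ks.Nodup) (hsub : ∀ x ∈ gs, x ∈ ks) :
    (ks.map (fun k => if p k then (gs.count k : Int) else 0)).sum = (gs.countP p : Int) := by
  induction gs with
  | nil => simp
  | cons x t ih =>
    have hx : x ∈ ks := hsub x (List.mem_cons_self)
    have hsub' : ∀ y ∈ t, y ∈ ks := fun y hy => hsub y (List.mem_cons_of_mem _ hy)
    have hmap : (ks.map (fun k => if p k then ((x :: t).count k : Int) else 0))
        = ks.map (fun k => (if p k then (t.count k : Int) else 0)
            + (if x = k then (if p x then (1 : Int) else 0) else 0)) := by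
      apply List.map_congr_left
      intro k _
      by_cases hxk : x = k
      · subst hxk
        rw [if_pos rfl, List.count_cons_self]
        cases hp : p x <;> simp
      · have hc : (x :: t).count k = t.count k := by
          rw [List.count_cons]
          simp [beq_iff_eq, hxk]
        rw [hc, if_neg hxk, add_zero]
    rw [hmap, PySem.List.sum_map_add_int, ih hsub',
        pv_sum_ite_mem x _ ks hnd hx, List.countP_cons]
    cases hp : p x <;> simp [hp]

-- a hit in the 255-char prefix of the body is a hit in the body
theorem pv_early_imp (body : String) (g : String)
    (h : PySem.Str.isIn g (PySem.Str.slice body none (some 255)) = true) :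
    PySem.Str.isIn g body = true := by
  rw [PySem.Str.isIn_iff_infix] at h ⊢
  rw [PySem.Str.toList_slice] at h
  have hsl : PySem.Chars.slice body.toList none (some 255) = body.toList.take 255 := by
    exact PySem.List.slice_to body.toList (by norm_num)
  rw [hsl] at h
  exact h.trans (List.take_prefix 255 body.toList).isInfix

-- ===== VERDICT (by name: the statement is the Claim_ definition above) =====
theorem append_ngrams_spec : Claim_equal_append_ngrams := by
  intro features text_headline text_body size _hDom
  unfold Spec_append_ngrams append_ngrams append_ngrams_alt pv_ngrams
  simp only []
  set words := (PySem.Str.split? text_headline " ").getD [] with hwords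
  set g : Int → String :=
    fun i => PySem.Str.join " " (PySem.List.slice words (some i) (some (i + size))) with hg
  set R := PySem.List.pyRange 0 ((words.length : Int) - size + 1) 1 with hR
  set pb : String → Bool := fun gram => PySem.Str.isIn gram text_body with hpb
  set pe : String → Bool :=
    fun gram => PySem.Str.isIn gram (PySem.Str.slice text_body none (some 255)) with hpe
  -- A's gram list is R.map g
  have hA : (R.foldl (fun output i =>
        output ++ [PySem.List.slice words (some i) (some (i + size))]) []).map
        (fun x => PySem.Str.join " " x) = R.map g := by
    rw [PySem.List.foldl_append_singleton_eq_map, List.nil_append, List.map_map]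
    rfl
  rw [hA]
  -- B's dict is the counter of the same list
  have hB : (R.foldl (fun (d : PySem.Dict String Int) i =>
        d.insert (g i) (d.getD (g i) 0 + 1)) PySem.Dict.empty)
      = PySem.Dict.counter (R.map g) := by
    rw [← PySem.Dict.foldl_insert_getD_add_one_eq_counter, List.foldl_map]
  rw [hB, PySem.Dict.items_counter]
  set grams := R.map g with hgrams
  have hImp : ∀ s, pe s = true → pb s = true := fun s h => pv_early_imp text_body s h
  rw [pv_loopA pb pe grams 0 0,
      pv_loopB pb pe hImp (PySem.Set.ofList grams) (fun k => ((grams.count k : Nat) : Int)) 0 0,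
      pv_sum_count pb grams (PySem.Set.ofList grams) (PySem.Set.nodup_ofList grams)
        (fun x hx => (PySem.Set.mem_ofList grams x).mpr hx),
      pv_sum_count pe grams (PySem.Set.ofList grams) (PySem.Set.nodup_ofList grams)
        (fun x hx => (PySem.Set.mem_ofList grams x).mpr hx)]
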